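-- pv_equiv track=rewrite | github.com/presentchris/Algorithm | 배열 만들기4.py | solution
-- ===== SOURCE A (Python) =====
-- def solution(arr):
--     stk = []
--
--     for i in range(len(arr)):
--         while True:
--             if len(stk) == 0:
--                 stk.append(arr[i])
--                 break
--             elif stk[-1] < arr[i]:
--                 stk.append(arr[i])
--                 break
--             elif stk[-1] >= arr[i]:
--                 stk.pop()
--
--     return stk
-- ===== SOURCE B (Python) =====
-- def solution(arr):
--     out = []
--     for x in reversed(arr):
--         if not out or x < out[-1]:
--             out.append(x)
--     out.reverse()
--     return out
-- ===== Notes on version B (the rewrite author's own statement) =====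
-- stated objective: simpler
-- what changed: Replaces the per-element pop-while monotonic stack with a single reverse scan that keeps an element exactly when it is below the smallest element kept so far (the strict suffix minima), then reverses the result.
import Mathlib
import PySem

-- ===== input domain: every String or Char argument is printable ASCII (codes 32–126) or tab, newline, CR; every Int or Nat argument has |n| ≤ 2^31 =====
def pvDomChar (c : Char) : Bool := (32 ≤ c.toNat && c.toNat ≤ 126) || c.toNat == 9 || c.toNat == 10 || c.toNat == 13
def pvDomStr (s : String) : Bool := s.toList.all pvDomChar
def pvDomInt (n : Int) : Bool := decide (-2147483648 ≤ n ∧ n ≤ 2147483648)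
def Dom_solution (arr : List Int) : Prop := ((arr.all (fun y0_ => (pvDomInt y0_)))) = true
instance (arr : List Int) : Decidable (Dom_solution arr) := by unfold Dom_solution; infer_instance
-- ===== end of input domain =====

-- B replaces A's pop-while monotonic stack by a single reverse scan keeping the
-- strict suffix minima (simpler structure; same result).

-- ===== PORT A =====
-- the inner 'while True' loop of A: pop while the top is ≥ arr[i], then push arr[i]
def solutionStep (stk : List Int) (x : Int) : List Int :=
  if h : stk = [] then stk ++ [x]
  else if stk.getLast h < x then stk ++ [x]
  else solutionStep stk.dropLast x
termination_by stk.length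
decreasing_by
  have : stk.length ≠ 0 := by simpa using h
  simp [List.length_dropLast]; omega

def solution (arr : List Int) : List Int :=
  arr.foldl solutionStep []

-- ===== PORT B =====
-- one step of B's reverse scan: append x iff out is empty or x < out[-1]
def solutionAltStep (out : List Int) (x : Int) : List Int :=
  if h : out = [] then out ++ [x]
  else if x < out.getLast h then out ++ [x]
  else out

def solution_alt (arr : List Int) : List Int :=
  (arr.reverse.foldl solutionAltStep []).reverse

-- ===== PRECONDITION & SPEC =====
def Spec_solution (arr : List Int) (out : List Int) : Prop := out = solution_alt arr
instance (arr : List Int) (out : List Int) : Decidable (Spec_solution arr out) := by unfold Spec_solution; infer_instance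

-- ===== CLAIM (what is proved, stated in full; the proofs are below) =====
def Claim_equal_solution : Prop := ∀ (arr : List Int), Dom_solution arr → Spec_solution arr (solution arr)

-- ===== LEMMAS AND PROOFS =====

-- reference function: the strict suffix minima of a list, built front-to-back
def sufmin : List Int → List Int
  | [] => []
  | x :: xs => if x < (sufmin xs).headD (x + 1) then x :: sufmin xs else sufmin xs

theorem sufmin_sorted (l : List Int) : (sufmin l).Pairwise (· < ·) := by
  induction l with
  | nil => simp [sufmin]
  | cons x xs ih =>
    simp only [sufmin]
    cases h : sufmin xs with
    | nil => simp
    | cons y t =>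
      rw [h] at ih
      simp only [List.headD_cons]
      split_ifs with hx
      · exact List.pairwise_cons.mpr ⟨fun b hb => by
          rcases List.mem_cons.mp hb with rfl | hb
          · exact hx
          · exact lt_trans hx (List.rel_of_pairwise_cons ih hb), ih⟩
      · exact ih

theorem sufmin_eq_nil (l : List Int) (h : sufmin l = []) : l = [] := by
  cases l with
  | nil => rfl
  | cons x xs =>
    simp only [sufmin] at h
    by_cases hc : x < (sufmin xs).headD (x + 1)
    · rw [if_pos hc] at h; exact absurd h (by simp)
    · rw [if_neg hc] at h; rw [h, List.headD_nil] at hc; omega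

-- on a sorted list, A's pop-while-≥ loop leaves exactly the elements < x, then pushes x
theorem stepA_sorted (x : Int) (s : List Int) :
    s.Pairwise (· < ·) → solutionStep s x = s.filter (· < x) ++ [x] := by
  induction s using solutionStep.induct x with
  | case1 => intro _; simp [solutionStep]
  | case2 s h ht =>
    intro hs
    rw [solutionStep]; simp only [dif_neg h, if_pos ht]
    congr 1
    refine (List.filter_eq_self.mpr ?_).symm
    intro a ha
    have hsplit : s = s.dropLast ++ [s.getLast h] := (List.dropLast_append_getLast h).symm
    rw [hsplit] at ha hs
    have hpair := List.pairwise_append.mp hs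
    rcases List.mem_append.mp ha with hd | he
    · exact decide_eq_true (lt_trans (by simpa using hpair.2.2 a hd) ht)
    · simp at he; subst he; exact decide_eq_true ht
  | case3 s h ht ih =>
    intro hs
    rw [solutionStep]; simp only [dif_neg h, if_neg ht]
    have hsplit : s = s.dropLast ++ [s.getLast h] := (List.dropLast_append_getLast h).symm
    have hds : s.dropLast.Pairwise (· < ·) := by
      rw [hsplit] at hs; exact (List.pairwise_append.mp hs).1
    rw [ih hds]
    congr 1
    conv_rhs => rw [hsplit]
    rw [List.filter_append]
    simp [ht]

-- a sorted list whose head is ≥ x has no element < x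
theorem filter_sorted_nil (x y : Int) (t : List Int) (hs : (y :: t).Pairwise (· < ·))
    (hy : ¬ y < x) : (y :: t).filter (· < x) = [] := by
  refine List.filter_eq_nil_iff.mpr ?_
  intro a ha
  rcases List.mem_cons.mp ha with rfl | ha
  · simpa using hy
  · have : y < a := List.rel_of_pairwise_cons hs ha
    simp; omega

-- appending x to the list updates the suffix minima by dropping everything ≥ x
theorem sufmin_append (p : List Int) (x : Int) :
    sufmin (p ++ [x]) = (sufmin p).filter (· < x) ++ [x] := by
  induction p with
  | nil => simp [sufmin]
  | cons a q ih =>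
    have hsort := sufmin_sorted q
    simp only [List.cons_append, sufmin, ih]
    cases hr : sufmin q with
    | nil =>
      have : q = [] := sufmin_eq_nil q hr
      subst this
      by_cases hax : a < x <;> simp [hax]
    | cons y t =>
      rw [hr] at hsort
      simp only [List.headD_cons]
      by_cases hyx : y < x
      · have hf : (y :: t).filter (· < x) = y :: t.filter (· < x) := by simp [hyx]
        rw [hf]
        simp only [List.cons_append, List.headD_cons]
        by_cases hay : a < y
        · have hax : a < x := lt_trans hay hyx
          simp [hay, hax, hf]
        · simp [hay, hf]
      · have hf : (y :: t).filter (· < x) = [] := filter_sorted_nil x y t hsort hyx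
        rw [hf]
        simp only [List.nil_append, List.headD_cons]
        by_cases hay : a < y
        · by_cases hax : a < x <;> simp [hay, hax, hf]
        · have hax : ¬ a < x := by omega
          simp [hay, hax, hf]

-- A's fold computes the suffix minima
theorem solution_eq_sufmin (arr : List Int) : solution arr = sufmin arr := by
  induction arr using List.reverseRecOn with
  | nil => simp [solution, sufmin]
  | append_singleton p x ih =>
    unfold solution at ih ⊢
    rw [List.foldl_append, List.foldl_cons, List.foldl_nil, ih,
        stepA_sorted x _ (sufmin_sorted p), sufmin_append]

-- B's step on a reversed list is sufmin's cons step, reversed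
theorem stepB_reverse (r : List Int) (x : Int) :
    solutionAltStep r.reverse x = (if x < r.headD (x + 1) then x :: r else r).reverse := by
  cases r with
  | nil => simp [solutionAltStep]
  | cons y t =>
    have hne : (y :: t).reverse ≠ [] := by simp
    have hl : (y :: t).reverse.getLast hne = y := by
      rw [List.getLast_reverse, List.head_cons]
    simp only [solutionAltStep, dif_neg hne, hl, List.headD_cons]
    by_cases hxy : x < y <;> simp [hxy]

-- B's fold computes the reversed suffix minima
theorem solution_alt_fold (arr : List Int) :
    arr.reverse.foldl solutionAltStep [] = (sufmin arr).reverse := by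
  induction arr with
  | nil => simp [sufmin]
  | cons x xs ih =>
    rw [List.reverse_cons, List.foldl_append, ih, List.foldl_cons, List.foldl_nil,
        stepB_reverse]
    simp only [sufmin]

-- ===== VERDICT (by name: the statement is the Claim_ definition above) =====
theorem solution_spec : Claim_equal_solution := by
  intro arr _
  unfold Spec_solution solution_alt
  rw [solution_alt_fold, List.reverse_reverse, solution_eq_sufmin]
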